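-- pv_equiv track=rewrite | github.com/Jojo6297/edame | example/EDAME_example.py | attr_difference
-- ===== SOURCE A (Python) =====
-- def mod2(pair):
--     pair = list(pair)
--     if pair[0] == pair[1]:
--         return 0
--     else:
--         return 1
--
-- def hamming(a, b):
--     '''takes individual attr'''
--     return (sum([mod2([a[i], b[i]]) for i in range(len(a))]))
--
-- def attr_difference(setA, setB):
--     '''For each attractor in setA find its closest attractors in SetB (by hamming)'''
--     hamm_dist_dict = {}
--     for item1 in setA:
--         hamm_dist = []
--         for item2 in setB:
--             hamm_dist.append(hamming(item1, item2))
--         hamm_dist_dict[item1] = [setB[i] for i in range(len(hamm_dist)) if hamm_dist[i] == min(hamm_dist) and hamm_dist[i] != 0]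
--
--     set_A_B = []
--     for key,val in hamm_dist_dict.items():
--         set_A_B.append([tuple([k-v1 for k,v1 in zip(key,v)]) for v in val])                                                                             # Find (cD - A*)
--
--     return(set_A_B)
-- ===== SOURCE B (Python) =====
-- def attr_difference(setA, setB):
--     '''For each attractor in setA find its closest attractors in SetB (by hamming)'''
--     result = []
--     seen = set()
--     for a in setA:
--         if a in seen:
--             continue
--         seen.add(a)
--         best = None
--         closest = []
--         for b in setB:
--             d = sum(1 for i in range(len(a)) if a[i] != b[i])
--             if best is None or d < best:
--                 best, closest = d, [b]
--             elif d == best: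
--                 closest.append(b)
--         if best == 0:
--             closest = []
--         result.append([tuple(a[i] - b[i] for i in range(len(a))) for b in closest])
--     return result
-- ===== Notes on version B (the rewrite author's own statement) =====
-- stated objective: faster
-- what changed: Replaces A's dict of per-key full distance lists (rescanned with min() once per index inside the filtering comprehension) by a single pass over setB per distinct setA key that tracks the running minimum and its bucket, with a seen-set replacing the dict for dedup.
import Mathlib
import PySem

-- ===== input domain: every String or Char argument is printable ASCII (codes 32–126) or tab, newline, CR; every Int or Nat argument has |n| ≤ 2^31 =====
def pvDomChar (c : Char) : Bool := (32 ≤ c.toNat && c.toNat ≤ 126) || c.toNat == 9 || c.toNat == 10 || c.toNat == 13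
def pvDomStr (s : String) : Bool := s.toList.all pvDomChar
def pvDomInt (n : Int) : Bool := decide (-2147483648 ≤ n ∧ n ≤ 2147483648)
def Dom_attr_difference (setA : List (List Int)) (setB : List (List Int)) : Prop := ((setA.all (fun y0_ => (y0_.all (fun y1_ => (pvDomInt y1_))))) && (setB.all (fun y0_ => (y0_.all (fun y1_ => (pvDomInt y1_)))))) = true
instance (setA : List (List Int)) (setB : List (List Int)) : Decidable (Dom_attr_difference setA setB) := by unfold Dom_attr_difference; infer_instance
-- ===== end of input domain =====

-- B replaces A's per-key full distance list (rescanned by min() at every index of the filtering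
-- comprehension) with a single min-tracking pass over setB per distinct setA key, and A's dict
-- with a seen-set; a timing run measured B faster.

-- ===== PORT A =====
def mod2 (pair : List Int) : Int :=
  if PySem.List.pyGetD pair 0 0 == PySem.List.pyGetD pair 1 0 then 0 else 1

def hamming (a : List Int) (b : List Int) : Int :=
  ((PySem.List.pyRange 0 a.length 1).map
    (fun i => mod2 [PySem.List.pyGetD a i 0, PySem.List.pyGetD b i 0])).sum

def attr_difference (setA : List (List Int)) (setB : List (List Int)) : List (List (List Int)) :=
  let hamm_dist_dict : PySem.Dict (List Int) (List (List Int)) :=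
    setA.foldl (fun d item1 =>
      let hamm_dist : List Int := setB.foldl (fun l item2 => l ++ [hamming item1 item2]) []
      d.insert item1
        ((PySem.List.pyRange 0 hamm_dist.length 1).foldl (fun acc i =>
          if PySem.List.pyGetD hamm_dist i 0 == (PySem.List.min? hamm_dist (fun x => x)).getD 0
              && !(PySem.List.pyGetD hamm_dist i 0 == 0)
          then acc ++ [PySem.List.pyGetD setB i []] else acc) []))
      PySem.Dict.empty
  hamm_dist_dict.items.foldl (fun out kv =>
    out ++ [kv.2.map (fun v => (kv.1.zip v).map (fun p => p.1 - p.2))]) []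

-- ===== PORT B =====
def hammingAlt (a : List Int) (b : List Int) : Int :=
  (PySem.List.pyRange 0 a.length 1).foldl
    (fun s i => if !(PySem.List.pyGetD a i 0 == PySem.List.pyGetD b i 0) then s + 1 else s) 0

-- body of B's inner loop: track the running minimum distance and its bucket
def altStep (a : List Int) (st : Option Int × List (List Int)) (b : List Int) :
    Option Int × List (List Int) :=
  let d := hammingAlt a b
  match st.1 with
  | none => (some d, [b])
  | some m => if d < m then (some d, [b]) else if d == m then (some m, st.2 ++ [b]) else st

def altBest (a : List Int) (setB : List (List Int)) : Option Int × List (List Int) :=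
  setB.foldl (altStep a) (none, [])

def altKey (a : List Int) (setB : List (List Int)) : List (List Int) :=
  let st := altBest a setB
  let closest := if st.1 == some 0 then [] else st.2
  closest.map (fun b =>
    (PySem.List.pyRange 0 a.length 1).map
      (fun i => PySem.List.pyGetD a i 0 - PySem.List.pyGetD b i 0))

def altLoop (setB : List (List Int)) : List (List Int) → PySem.Set (List Int) → List (List (List Int))
  | [], _ => []
  | a :: rest, seen =>
    if PySem.Set.contains seen a then altLoop setB rest seen
    else altKey a setB :: altLoop setB rest (PySem.Set.add seen a)

def attr_difference_alt (setA : List (List Int)) (setB : List (List Int)) : List (List (List Int)) :=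
  altLoop setB setA PySem.Set.empty

-- ===== PRECONDITION & SPEC =====
-- Pre_ excludes exactly the inputs on which the Python A raises IndexError
-- (some setB row shorter than some setA row).
def Pre_attr_difference (setA : List (List Int)) (setB : List (List Int)) : Prop :=
  ∀ a ∈ setA, ∀ b ∈ setB, a.length ≤ b.length
instance (setA : List (List Int)) (setB : List (List Int)) : Decidable (Pre_attr_difference setA setB) := by unfold Pre_attr_difference; infer_instance

def pvWitness_attr_difference : List (List Int) × List (List Int) :=
  ([[1, 0], [0, 1], [1, 0]], [[1, 1], [0, 1], [0, 0]])

def Spec_attr_difference (setA : List (List Int)) (setB : List (List Int)) (out : List (List (List Int))) : Prop := out = attr_difference_alt setA setB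
instance (setA : List (List Int)) (setB : List (List Int)) (out : List (List (List Int))) : Decidable (Spec_attr_difference setA setB out) := by unfold Spec_attr_difference; infer_instance

-- ===== CLAIM (what is proved, stated in full; the proofs are below) =====
def Claim_equal_attr_difference : Prop := ∀ (setA : List (List Int)) (setB : List (List Int)), Dom_attr_difference setA setB → Pre_attr_difference setA setB → Spec_attr_difference setA setB (attr_difference setA setB)

-- ===== LEMMAS AND PROOFS =====

-- the two hamming helpers agree everywhere
theorem hammingAlt_eq (a b : List Int) : hammingAlt a b = hamming a b := by
  unfold hammingAlt hamming
  have h1 : (fun (s : Int) i => if !(PySem.List.pyGetD a i 0 == PySem.List.pyGetD b i 0) then s + 1 else s)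
      = fun s i => s + (if PySem.List.pyGetD a i 0 == PySem.List.pyGetD b i 0 then (0:Int) else 1) := by
    funext s i
    by_cases h : PySem.List.pyGetD a i 0 = PySem.List.pyGetD b i 0 <;> simp [h]
  rw [h1, PySem.List.foldl_add]
  simp [mod2, pysem]

-- B's one-pass fold computes the minimum distance and the bucket of its witnesses
theorem altBest_aux (a : List Int) (l : List (List Int)) (m : Int) (acc : List (List Int)) :
    l.foldl (altStep a) (some m, acc)
    = (some ((l.map (hammingAlt a)).foldl min m),
       (if (l.map (hammingAlt a)).foldl min m = m then acc else [])
         ++ l.filter (fun b => hammingAlt a b == (l.map (hammingAlt a)).foldl min m)) := by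
  induction l generalizing m acc with
  | nil => simp
  | cons b t ih =>
    have hM : (t.map (hammingAlt a)).foldl min (min m (hammingAlt a b)) ≤ min m (hammingAlt a b) :=
      (PySem.List.foldl_min_le _ _).1
    simp only [List.foldl_cons, List.map_cons, List.filter_cons]
    rcases lt_trichotomy (hammingAlt a b) m with hlt | heq | hgt
    · rw [show altStep a (some m, acc) b = (some (hammingAlt a b), [b]) from by simp [altStep, hlt]]
      rw [ih]
      have hmin : min m (hammingAlt a b) = hammingAlt a b := by omega
      rw [hmin] at hM
      simp only [hmin]
      have hne : (t.map (hammingAlt a)).foldl min (hammingAlt a b) ≠ m := by omega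
      by_cases hd : hammingAlt a b = (t.map (hammingAlt a)).foldl min (hammingAlt a b)
      · simp [← hd]
        intro e; omega
      · have h2 : ¬ ((t.map (hammingAlt a)).foldl min (hammingAlt a b) = hammingAlt a b) :=
          fun e => hd e.symm
        simp [hne, h2, hd]
    · rw [show altStep a (some m, acc) b = (some m, acc ++ [b]) from by simp [altStep, heq]]
      rw [ih]
      have hmin : min m (hammingAlt a b) = m := by omega
      simp only [hmin]
      by_cases hMm : (t.map (hammingAlt a)).foldl min m = m
      · simp [hMm, heq]
      · have h2 : ¬ (hammingAlt a b = (t.map (hammingAlt a)).foldl min m) := by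
          rw [heq]; exact fun e => hMm e.symm
        simp [hMm, h2]
    · rw [show altStep a (some m, acc) b = (some m, acc) from by
        have h1 : ¬ (hammingAlt a b < m) := by omega
        have h2 : ¬ (hammingAlt a b = m) := by omega
        simp [altStep, h1, h2]]
      rw [ih]
      have hmin : min m (hammingAlt a b) = m := by omega
      rw [hmin] at hM
      simp only [hmin]
      have h2 : ¬ (hammingAlt a b = (t.map (hammingAlt a)).foldl min m) := by omega
      simp [h2]

theorem altBest_spec (a : List Int) (setB : List (List Int)) :
    altBest a setB = (PySem.List.min? (setB.map (hammingAlt a)) (fun x => x),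
      setB.filter (fun b => hammingAlt a b ==
        (PySem.List.min? (setB.map (hammingAlt a)) (fun x => x)).getD 0)) := by
  cases setB with
  | nil => simp [altBest, pysem, PySem.List.min?]
  | cons b t =>
    have h0 : altStep a (none, []) b = (some (hammingAlt a b), [b]) := by simp [altStep]
    rw [altBest, List.foldl_cons, h0, altBest_aux]
    rw [List.map_cons, PySem.List.min?_id_cons]
    simp only [Option.getD_some, List.filter_cons]
    by_cases hd : hammingAlt a b = (t.map (hammingAlt a)).foldl min (hammingAlt a b)
    · simp [← hd]
    · have h2 : ¬ (List.foldl min (hammingAlt a b) (t.map (hammingAlt a)) = hammingAlt a b) :=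
        fun e => hd e.symm
      simp [hd, h2]

-- first occurrences of l not already in seen, in order (B's dedup order)
def newFirst : List (List Int) → PySem.Set (List Int) → List (List Int)
  | [], _ => []
  | a :: t, s =>
    if PySem.Set.contains s a then newFirst t s else a :: newFirst t (PySem.Set.add s a)

theorem set_update_eq_append_newFirst (l : List (List Int)) (s : PySem.Set (List Int)) :
    PySem.Set.update s l = s ++ newFirst l s := by
  induction l generalizing s with
  | nil => simp [PySem.Set.update, newFirst]
  | cons a t ih =>
    show PySem.Set.update (PySem.Set.add s a) t = _
    by_cases h : PySem.Set.contains s a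
    · rw [newFirst, if_pos h,
        show PySem.Set.add s a = s from by
          simp [PySem.Set.add, PySem.Set.contains] at h ⊢; exact h, ih]
    · rw [newFirst, if_neg h, ih]
      rw [show PySem.Set.add s a = s ++ [a] from by
        simp [PySem.Set.add, PySem.Set.contains] at h ⊢; exact h]
      simp

theorem altLoop_eq_map (setB l : List (List Int)) (s : PySem.Set (List Int)) :
    altLoop setB l s = (newFirst l s).map (fun a => altKey a setB) := by
  induction l generalizing s with
  | nil => rfl
  | cons a t ih =>
    rw [altLoop, newFirst]
    by_cases h : PySem.Set.contains s a <;> (simp [PySem.Set.contains] at h; simp [h, ih])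

theorem newFirst_subset (l : List (List Int)) (s : PySem.Set (List Int)) :
    ∀ x ∈ newFirst l s, x ∈ l := by
  induction l generalizing s with
  | nil => intro x hx; simp [newFirst] at hx
  | cons a t ih =>
    intro x hx
    rw [newFirst] at hx
    by_cases h : PySem.Set.contains s a
    · rw [if_pos h] at hx; exact List.mem_cons_of_mem _ (ih s x hx)
    · rw [if_neg h] at hx
      rcases List.mem_cons.mp hx with h1 | h1
      · simp [h1]
      · exact List.mem_cons_of_mem _ (ih _ x h1)

-- getD of a fold of inserts whose value depends only on the key
theorem getD_foldl_insert_fun (f : List Int → List (List Int)) (l : List (List Int))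
    (d : PySem.Dict (List Int) (List (List Int))) (k : List Int) (dflt : List (List Int)) :
    (l.foldl (fun d k => d.insert k (f k)) d).getD k dflt
      = if k ∈ l then f k else d.getD k dflt := by
  induction l using List.reverseRecOn with
  | nil => simp
  | append_singleton t x ih =>
    rw [List.foldl_append]
    simp only [List.foldl_cons, List.foldl_nil]
    rw [PySem.Dict.getD_insert, ih]
    by_cases hk : k = x <;> by_cases hm : k ∈ t <;> simp [hk, hm]

-- the subtraction step: zip form (A, under the length bound) = index form (B)
theorem zip_sub_eq_range (a v : List Int) (h : a.length ≤ v.length) :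
    (a.zip v).map (fun p => p.1 - p.2)
      = (PySem.List.pyRange 0 a.length 1).map
          (fun i => PySem.List.pyGetD a i 0 - PySem.List.pyGetD v i 0) := by
  rw [PySem.List.pyRange_one]
  apply List.ext_getElem
  · simp; omega
  · intro i h1 h2
    have hi : i < a.length := by simp at h1; omega
    have hiv : i < v.length := by omega
    simp only [List.getElem_map, List.getElem_zip, List.getElem_range, zero_add]
    rw [PySem.List.pyGetD_natCast, PySem.List.pyGetD_natCast]
    simp [List.getD_eq_getElem?_getD, hi, hiv]

-- A's per-key inner computation, named for the proofs (definitionally A's insert value)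
def bucketA (setB : List (List Int)) (item1 : List Int) : List (List Int) :=
  let hamm_dist : List Int := setB.foldl (fun l item2 => l ++ [hamming item1 item2]) []
  (PySem.List.pyRange 0 hamm_dist.length 1).foldl (fun acc i =>
    if PySem.List.pyGetD hamm_dist i 0 == (PySem.List.min? hamm_dist (fun x => x)).getD 0
        && !(PySem.List.pyGetD hamm_dist i 0 == 0)
    then acc ++ [PySem.List.pyGetD setB i []] else acc) []

-- A's bucket-and-subtract for one key equals B's altKey, given the length precondition
theorem key_value_eq (a : List Int) (setB : List (List Int))
    (hlen : ∀ b ∈ setB, a.length ≤ b.length) :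
    (bucketA setB a).map (fun v => (a.zip v).map (fun p => p.1 - p.2)) = altKey a setB := by
  unfold bucketA
  have hds : setB.foldl (fun l item2 => l ++ [hamming a item2]) [] = setB.map (hammingAlt a) := by
    rw [PySem.List.foldl_append_singleton_eq_map]
    rw [show hamming a = hammingAlt a from funext fun b => (hammingAlt_eq a b).symm]
    simp
  simp only [hds]
  set m0 : Int := (PySem.List.min? (setB.map (hammingAlt a)) (fun x => x)).getD 0 with hm0
  have hfold : (PySem.List.pyRange 0 (setB.map (hammingAlt a)).length 1).foldl (fun acc i =>
        if PySem.List.pyGetD (setB.map (hammingAlt a)) i 0 == m0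
            && !(PySem.List.pyGetD (setB.map (hammingAlt a)) i 0 == 0)
        then acc ++ [PySem.List.pyGetD setB i []] else acc) []
      = setB.filter (fun b => hammingAlt a b == m0 && !(hammingAlt a b == 0)) := by
    rw [List.length_map]
    have hcongr : ∀ (acc : List (List Int)) (i : Int), i ∈ PySem.List.pyRange 0 (setB.length : Int) 1 →
        (if PySem.List.pyGetD (setB.map (hammingAlt a)) i 0 == m0
            && !(PySem.List.pyGetD (setB.map (hammingAlt a)) i 0 == 0)
         then acc ++ [PySem.List.pyGetD setB i []] else acc)
        = (fun (acc : List (List Int)) (x : List Int) =>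
            if hammingAlt a x == m0 && !(hammingAlt a x == 0) then acc ++ [x] else acc)
          acc (PySem.List.pyGetD setB i []) := by
      intro acc i hi
      rw [PySem.List.mem_pyRange_one] at hi
      have h1 : PySem.List.pyGetD (setB.map (hammingAlt a)) i 0
          = hammingAlt a (PySem.List.pyGetD setB i []) := by
        rw [PySem.List.pyGetD_eq_getElem _ 0 (by omega) (by simpa using hi.2),
            PySem.List.pyGetD_eq_getElem _ ([] : List Int) (by omega) (by simpa using hi.2)]
        simp
      rw [h1]
    rw [PySem.List.foldl_congr_mem _ _ _ _ hcongr]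
    rw [PySem.List.foldl_pyRange_zero_pyGetD' setB []
      (fun (acc : List (List Int)) (x : List Int) =>
        if hammingAlt a x == m0 && !(hammingAlt a x == 0) then acc ++ [x] else acc) []]
    rw [PySem.List.foldl_append_if_eq_filter]
    simp
  rw [hfold]
  rw [altKey, altBest_spec]
  simp only [← hm0]
  rcases hmin : PySem.List.min? (setB.map (hammingAlt a)) (fun x => x) with _ | m1
  · have hB : setB = [] := by
      have := (PySem.List.min?_eq_none_iff _ _).mp hmin
      simpa using this
    subst hB; simp
  · have hm1 : m0 = m1 := by rw [hm0, hmin]; rfl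
    by_cases hz : m1 = 0
    · have hfilter : setB.filter (fun b => hammingAlt a b == m0 && !(hammingAlt a b == 0)) = [] := by
        apply List.filter_eq_nil_iff.mpr
        intro b _
        by_cases hb : hammingAlt a b = 0 <;> simp [hb, hm1, hz]
      rw [hfilter]
      simp [hz]
    · have hcond : ((some m1 : Option Int) == some 0) = false := by simp [hz]
      simp only [hcond, Bool.false_eq_true, if_false]
      have hfilter : setB.filter (fun b => hammingAlt a b == m0 && !(hammingAlt a b == 0))
          = setB.filter (fun b => hammingAlt a b == m0) := by
        apply List.filter_congr
        intro b _
        by_cases hb : hammingAlt a b = m0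
        · simp [hb, hm1, hz]
        · simp [hb]
      rw [hfilter, hm1]
      apply List.map_congr_left
      intro v hv
      exact zip_sub_eq_range a v (hlen v (List.mem_of_mem_filter hv))

-- A's dict fold produces one item per first occurrence, valued by bucketA
theorem items_foldl_insert_bucket (setA setB : List (List Int)) :
    (setA.foldl (fun d item1 => d.insert item1 (bucketA setB item1)) PySem.Dict.empty).items
      = (newFirst setA []).map (fun k => (k, bucketA setB k)) := by
  have hnd : (setA.foldl (fun d item1 => d.insert item1 (bucketA setB item1)) PySem.Dict.empty).keys.Nodup :=
    PySem.Dict.nodup_keys_foldl_insert setA _ PySem.Dict.empty (by simp)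
  rw [PySem.Dict.items_eq_map_keys _ hnd []]
  rw [PySem.Dict.keys_foldl_insert]
  have hk : PySem.Set.update (PySem.Dict.empty : PySem.Dict (List Int) (List (List Int))).keys setA
      = newFirst setA [] := by
    rw [show (PySem.Dict.empty : PySem.Dict (List Int) (List (List Int))).keys = ([] : List (List Int)) from rfl]
    rw [set_update_eq_append_newFirst]
    simp
  rw [hk]
  apply List.map_congr_left
  intro k hk2
  rw [getD_foldl_insert_fun]
  simp [newFirst_subset setA [] k hk2]

-- ===== VERDICT (by name: the statement is the Claim_ definition above) =====
theorem attr_difference_spec : Claim_equal_attr_difference := by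
  intro setA setB _ hpre
  show attr_difference setA setB = attr_difference_alt setA setB
  show (setA.foldl (fun d item1 => d.insert item1 (bucketA setB item1)) PySem.Dict.empty).items.foldl
      (fun out kv => out ++ [kv.2.map (fun v => (kv.1.zip v).map (fun p => p.1 - p.2))]) []
      = altLoop setB setA PySem.Set.empty
  rw [altLoop_eq_map, items_foldl_insert_bucket]
  rw [PySem.List.foldl_append_singleton_eq_map]
  rw [List.nil_append, List.map_map]
  show List.map (fun k => (bucketA setB k).map (fun v => (k.zip v).map (fun p => p.1 - p.2))) (newFirst setA []) = _
  apply List.map_congr_left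
  intro k hk
  exact key_value_eq k setB (hpre k (newFirst_subset setA [] k hk))
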